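-- pv_equiv track=rewrite | github.com/busenuraktilav/DataMiningHW | exercise3/exercise3.py | find_most_close
-- ===== SOURCE A (Python) =====
-- def find_most_close(arr, k):
--
--     most_close = []
--
--     for i in range(k):
--         most_close.append(max(arr))
--
--     for i in arr:
--         maxi = max(most_close)
--         if (i < maxi):
--             ind = most_close.index(maxi)
--             most_close[ind] = i
--
--     return (most_close)
-- ===== SOURCE B (Python) =====
-- def find_most_close(arr, k):
--     # keep the k current candidates in `slots` (same positions A uses), plus a
--     # sorted pool of (value, -slot) pairs so the current maximum slot is pool[-1]
--     # instead of being rediscovered by max()+index() scans on every element.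
--     slots = [max(arr) for _ in range(k)]
--     pool = [(slots[j], -j) for j in range(k - 1, -1, -1)]  # ascending by (value, -slot)
--     for x in arr:
--         v, nj = pool[-1]
--         if x < v:
--             pool.pop()
--             j = -nj
--             slots[j] = x
--             key = (x, -j)
--             i = 0
--             while i < len(pool) and pool[i] < key:
--                 i += 1
--             pool.insert(i, key)
--     return slots
-- ===== Notes on version B (the rewrite author's own statement) =====
-- stated objective: alternative
-- what changed: Instead of rescanning the slot list with max()+index() for every element, B maintains a sorted pool of (value, -slot) pairs so the current maximum slot is read in O(1) off the pool's end and updated by one ordered insertion.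
import Mathlib
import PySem

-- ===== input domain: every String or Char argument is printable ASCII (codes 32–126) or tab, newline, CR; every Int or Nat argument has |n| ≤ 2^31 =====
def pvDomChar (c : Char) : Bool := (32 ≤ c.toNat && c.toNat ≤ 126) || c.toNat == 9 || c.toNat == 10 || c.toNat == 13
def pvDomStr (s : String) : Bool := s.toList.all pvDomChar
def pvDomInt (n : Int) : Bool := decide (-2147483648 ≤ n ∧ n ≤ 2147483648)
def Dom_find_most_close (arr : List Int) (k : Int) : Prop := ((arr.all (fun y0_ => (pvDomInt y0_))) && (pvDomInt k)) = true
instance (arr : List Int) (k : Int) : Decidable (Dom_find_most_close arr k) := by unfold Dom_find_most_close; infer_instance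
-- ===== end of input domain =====

-- B keeps a sorted pool of (value, -slot) pairs so the current maximum slot is read off
-- the pool's end instead of being rediscovered by max()+index() scans for every element.

-- ===== PORT A =====
-- max([]) raises ValueError in Python; `.getD 0` stands for that, excluded by Pre_.
def find_most_close (arr : List Int) (k : Int) : List Int :=
  let most_close := (PySem.List.pyRange 0 k 1).foldl
    (fun mc _ => mc ++ [(PySem.List.max? arr (fun y => y)).getD 0]) []
  arr.foldl (fun mc i =>
    let maxi := (PySem.List.max? mc (fun y => y)).getD 0
    if i < maxi then
      let ind := (PySem.List.index? mc maxi).getD 0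
      mc.set ind i
    else mc) most_close

-- ===== PORT B =====
-- Python tuple comparison (v1, j1) < (v2, j2), exact lexicographic order on Int pairs.
def pvLexLt (a b : Int × Int) : Bool := a.1 < b.1 || (a.1 == b.1 && a.2 < b.2)

-- the scan-and-insert loop of Source B (find first position whose entry is not < key, insert there)
def pvInsert (key : Int × Int) : List (Int × Int) → List (Int × Int)
  | [] => [key]
  | p :: rest => if pvLexLt p key then p :: pvInsert key rest else key :: p :: rest

-- one iteration of Source B's main loop; pool[-1] on an empty pool raises IndexError (excluded by Pre_)
def pvStepB (st : List Int × List (Int × Int)) (x : Int) : List Int × List (Int × Int) :=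
  match st.2.getLast? with
  | none => st
  | some (v, nj) =>
    if x < v then
      let j := -nj
      (st.1.set j.toNat x, pvInsert (x, -j) st.2.dropLast)
    else st

def find_most_close_alt (arr : List Int) (k : Int) : List Int :=
  let slots := (PySem.List.pyRange 0 k 1).map
    (fun _ => (PySem.List.max? arr (fun y => y)).getD 0)   -- max([]) raises: excluded by Pre_
  let pool := (PySem.List.pyRange (k-1) (-1) (-1)).map
    (fun j => (PySem.List.pyGetD slots j 0, -j))
  (arr.foldl pvStepB (slots, pool)).1

-- ===== PRECONDITION & SPEC =====
-- A raises ValueError (max of an empty sequence) when arr = [] and k ≥ 1, and also when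
-- arr ≠ [] and k ≤ 0 (most_close is empty in the second loop); exactly those are excluded.
def Pre_find_most_close (arr : List Int) (k : Int) : Prop :=
  (arr = [] ∧ k ≤ 0) ∨ (arr ≠ [] ∧ 1 ≤ k)
instance (arr : List Int) (k : Int) : Decidable (Pre_find_most_close arr k) := by
  unfold Pre_find_most_close; infer_instance

def pvWitness_find_most_close : List Int × Int := ([3, 1, 2], 2)

def Spec_find_most_close (arr : List Int) (k : Int) (out : List Int) : Prop := out = find_most_close_alt arr k
instance (arr : List Int) (k : Int) (out : List Int) : Decidable (Spec_find_most_close arr k out) := by unfold Spec_find_most_close; infer_instance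

-- ===== CLAIM (what is proved, stated in full; the proofs are below) =====
def Claim_equal_find_most_close : Prop := ∀ (arr : List Int) (k : Int), Dom_find_most_close arr k → Pre_find_most_close arr k → Spec_find_most_close arr k (find_most_close arr k)

-- ===== LEMMAS AND PROOFS =====

-- A's loop body as a function
def pvStepA (mc : List Int) (i : Int) : List Int :=
  let maxi := (PySem.List.max? mc (fun y => y)).getD 0
  if i < maxi then
    let ind := (PySem.List.index? mc maxi).getD 0
    mc.set ind i
  else mc

-- the pool that corresponds to a slots list: (value, -index) for every slot
def pvPairs (slots : List Int) : List (Int × Int) :=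
  (PySem.List.enumerate slots 0).map (fun p => (p.2, -p.1))

def pvInv (slots : List Int) (pool : List (Int × Int)) : Prop :=
  List.Pairwise (fun a b => pvLexLt a b = true) pool ∧ pool.Perm (pvPairs slots)

lemma pvLexLt_trans {a b c : Int × Int} (h1 : pvLexLt a b = true) (h2 : pvLexLt b c = true) :
    pvLexLt a c = true := by
  simp only [pvLexLt, Bool.or_eq_true, Bool.and_eq_true, decide_eq_true_eq, beq_iff_eq] at *
  omega

lemma pvLexLt_total {a b : Int × Int} (h : a.2 ≠ b.2) :
    pvLexLt a b = true ∨ pvLexLt b a = true := by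
  simp only [pvLexLt, Bool.or_eq_true, Bool.and_eq_true, decide_eq_true_eq, beq_iff_eq]
  omega

lemma pvInsert_perm (key : Int × Int) (l : List (Int × Int)) :
    (pvInsert key l).Perm (key :: l) := by
  induction l with
  | nil => simp [pvInsert]
  | cons p rest ih =>
    simp only [pvInsert]
    split
    · exact (ih.cons p).trans (List.Perm.swap key p rest)
    · exact List.Perm.refl _

lemma pvInsert_pairwise (key : Int × Int) (l : List (Int × Int))
    (hs : List.Pairwise (fun a b => pvLexLt a b = true) l)
    (hne : ∀ a ∈ l, a.2 ≠ key.2) :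
    List.Pairwise (fun a b => pvLexLt a b = true) (pvInsert key l) := by
  induction l with
  | nil => simp [pvInsert]
  | cons p rest ih =>
    rcases List.pairwise_cons.mp hs with ⟨hp, hrest⟩
    simp only [pvInsert]
    split
    · rename_i hlt
      refine List.pairwise_cons.mpr ⟨?_, ih hrest (fun a ha => hne a (List.mem_cons_of_mem _ ha))⟩
      intro b hb
      rcases List.mem_cons.mp ((pvInsert_perm key rest).mem_iff.mp hb) with rfl | hb'
      · exact hlt
      · exact hp b hb'
    · rename_i hnlt
      have hkp : pvLexLt key p = true := by
        rcases pvLexLt_total (Ne.symm (hne p (List.mem_cons_self))) with h | h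
        · exact h
        · exact absurd h hnlt
      refine List.pairwise_cons.mpr ⟨?_, hs⟩
      intro b hb
      rcases List.mem_cons.mp hb with rfl | hb'
      · exact hkp
      · exact pvLexLt_trans hkp (hp b hb')

lemma mem_pvPairs {slots : List Int} {p : Int × Int} :
    p ∈ pvPairs slots ↔ ∃ (j : Nat) (h : j < slots.length), p = (slots[j], -(j : Int)) := by
  constructor
  · intro hp
    obtain ⟨q, hq, rfl⟩ := List.mem_map.mp hp
    obtain ⟨j, hj, rfl⟩ := (PySem.List.mem_enumerate_iff _ _ _).mp hq
    exact ⟨j, hj, by simp⟩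
  · rintro ⟨j, hj, rfl⟩
    refine List.mem_map.mpr ⟨((j : Int), slots[j]), ?_, by simp⟩
    exact (PySem.List.mem_enumerate_iff _ _ _).mpr ⟨j, hj, by simp⟩

lemma pvPairs_length (slots : List Int) : (pvPairs slots).length = slots.length := by
  simp [pvPairs, PySem.List.length_enumerate]

-- the last element of a sorted pool is (max value, -(first index of that max)) of slots
lemma pvLast_char (slots : List Int) (pool : List (Int × Int))
    (h1 : slots ≠ []) (h2 : pvInv slots pool) :
    ∃ (M : Int) (J : Nat), pool.getLast? = some (M, -(J : Int)) ∧
      PySem.List.max? slots (fun y => y) = some M ∧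
      PySem.List.index? slots M = some J ∧ J < slots.length := by
  obtain ⟨hsort, hperm⟩ := h2
  have hpool_ne : pool ≠ [] := by
    intro h
    apply h1
    have := hperm.length_eq
    rw [h, pvPairs_length] at this
    exact List.length_eq_zero_iff.mp this.symm
  have hlast? : pool.getLast? = some (pool.getLast hpool_ne) := List.getLast?_eq_some_getLast hpool_ne
  have hsplit : pool.dropLast ++ [pool.getLast hpool_ne] = pool := List.dropLast_append_getLast hpool_ne
  have hmem : pool.getLast hpool_ne ∈ pvPairs slots := hperm.subset (List.getLast_mem hpool_ne)
  obtain ⟨J, hJ, hlasteq⟩ := mem_pvPairs.mp hmem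
  have hsort' : List.Pairwise (fun a b => pvLexLt a b = true) (pool.dropLast ++ [pool.getLast hpool_ne]) := by
    rw [hsplit]; exact hsort
  have hall : ∀ p ∈ pvPairs slots, p = pool.getLast hpool_ne ∨ pvLexLt p (pool.getLast hpool_ne) = true := by
    intro p hp
    have hp' : p ∈ pool := hperm.symm.subset hp
    rw [← hsplit] at hp'
    rcases List.mem_append.mp hp' with h | h
    · exact Or.inr ((List.pairwise_append.mp hsort').2.2 p h _ (List.mem_singleton_self _))
    · exact Or.inl (by simpa using h)
  have hub : ∀ y ∈ slots, y ≤ slots[J] := by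
    intro y hy
    obtain ⟨j, hj, rfl⟩ := List.mem_iff_getElem.mp hy
    rcases hall _ (mem_pvPairs.mpr ⟨j, hj, rfl⟩) with heq | hlt
    · rw [hlasteq] at heq
      exact le_of_eq (Prod.ext_iff.mp heq).1
    · rw [hlasteq] at hlt
      simp only [pvLexLt, Bool.or_eq_true, Bool.and_eq_true, decide_eq_true_eq, beq_iff_eq] at hlt
      omega
  obtain ⟨m, hm⟩ : ∃ m, PySem.List.max? slots (fun y => y) = some m := by
    cases hmx : PySem.List.max? slots (fun y => y) with
    | none => exact absurd ((PySem.List.max?_eq_none_iff _ _).mp hmx) h1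
    | some m => exact ⟨m, rfl⟩
  have hmM : m = slots[J] :=
    le_antisymm (hub m (PySem.List.max?_mem hm))
      (PySem.List.max?_isMax hm slots[J] (List.getElem_mem hJ))
  have hnot : slots[J] ∉ slots.take J := by
    intro hmem'
    obtain ⟨j, hj, hje⟩ := List.mem_take_iff_getElem.mp hmem'
    have hjJ : j < J := lt_of_lt_of_le hj (min_le_left _ _)
    have hjlen : j < slots.length := lt_of_lt_of_le hj (min_le_right _ _)
    rcases hall _ (mem_pvPairs.mpr ⟨j, hjlen, rfl⟩) with heq | hlt
    · rw [hlasteq] at heq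
      have : -(j : Int) = -(J : Int) := congrArg Prod.snd heq
      omega
    · rw [hlasteq] at hlt
      simp only [pvLexLt, Bool.or_eq_true, Bool.and_eq_true, decide_eq_true_eq, beq_iff_eq] at hlt
      rw [hje] at hlt
      omega
  have hidx : PySem.List.index? slots slots[J] = some J := by
    rw [PySem.List.index?_eq_some_iff]
    refine ⟨slots.take J, slots.drop (J + 1), ?_, by simp [hJ.le], hnot⟩
    rw [List.getElem_cons_drop hJ, List.take_append_drop]
  exact ⟨slots[J], J, by rw [hlast?, hlasteq], hmM ▸ hm, hidx, hJ⟩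

lemma pvEnumerate_set (l : List Int) : ∀ (n : Nat) (a : Int) (s : Int),
    PySem.List.enumerate (l.set n a) s = (PySem.List.enumerate l s).set n (s + (n : Int), a) := by
  induction l with
  | nil => intro n a s; simp [PySem.List.enumerate_nil]
  | cons x xs ih =>
    intro n a s
    cases n with
    | zero => simp [PySem.List.enumerate_cons]
    | succ m =>
      simp only [List.set_cons_succ, PySem.List.enumerate_cons, ih m a (s + 1)]
      rw [show s + ((m + 1 : Nat) : Int) = (s + 1) + (m : Int) by push_cast; ring]

lemma pvPairs_set (slots : List Int) (n : Nat) (a : Int) :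
    pvPairs (slots.set n a) = (pvPairs slots).set n (a, -(n : Int)) := by
  simp [pvPairs, pvEnumerate_set, List.map_set]

lemma pvSnd_nodup {slots : List Int} {pool : List (Int × Int)}
    (hperm : pool.Perm (pvPairs slots)) : (pool.map Prod.snd).Nodup := by
  have h1 : (pvPairs slots).map Prod.snd =
      (PySem.List.pyRange 0 (0 + (slots.length : Int)) 1).map (fun a => -a) := by
    simp only [pvPairs, List.map_map]
    have : ((PySem.List.enumerate slots 0).map (·.1)).map (fun a => -a) =
        (PySem.List.pyRange 0 (0 + (slots.length : Int)) 1).map (fun a => -a) := by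
      rw [PySem.List.map_fst_enumerate]
    simpa [List.map_map, Function.comp] using this
  have h2 : ((pvPairs slots).map Prod.snd).Nodup := by
    rw [h1]
    exact (PySem.List.nodup_pyRange_one _ _).map (fun a b h => by omega)
  exact ((hperm.map Prod.snd).nodup_iff).mpr h2

lemma pvStep_ok (x : Int) (slots : List Int) (pool : List (Int × Int))
    (h1 : slots ≠ []) (h2 : pvInv slots pool) :
    (pvStepB (slots, pool) x).1 = pvStepA slots x ∧
    (pvStepB (slots, pool) x).1 ≠ [] ∧
    pvInv (pvStepB (slots, pool) x).1 (pvStepB (slots, pool) x).2 := by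
  obtain ⟨M, J, hlast, hmax, hidx, hJ⟩ := pvLast_char slots pool h1 h2
  obtain ⟨hsort, hperm⟩ := h2
  obtain ⟨hJ', hMJ, _⟩ := PySem.List.getElem_of_index?_eq_some hidx
  have hpool_ne : pool ≠ [] := by
    intro h; rw [h] at hlast; simp at hlast
  have hgl : pool.getLast hpool_ne = (M, -(J : Int)) := by
    have := List.getLast?_eq_some_getLast hpool_ne
    rw [hlast] at this
    exact (Option.some_injective _ this).symm
  have hsplit : pool.dropLast ++ [((M : Int), -(J : Int))] = pool := by
    rw [← hgl]; exact List.dropLast_append_getLast hpool_ne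
  by_cases hx : x < M
  · have hred : pvStepB (slots, pool) x =
        (slots.set J x, pvInsert (x, -(J : Int)) pool.dropLast) := by
      simp [pvStepB, hlast, hx]
    have hidx' : List.idxOf? M slots = some J := by simpa using hidx
    have hredA : pvStepA slots x = slots.set J x := by
      simp [pvStepA, hmax, hidx', hx]
    refine ⟨by rw [hred, hredA], ?_, ?_⟩
    · rw [hred]
      intro h
      have := congrArg List.length h
      simp at this
      exact h1 this
    · rw [hred]
      have hne : ∀ a ∈ pool.dropLast, a.2 ≠ (x, -(J : Int)).2 := by
        have hnd : (pool.map Prod.snd).Nodup := pvSnd_nodup hperm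
        rw [← hsplit, List.map_append] at hnd
        obtain ⟨-, -, hdisj⟩ := List.nodup_append.mp hnd
        intro a ha hcontra
        exact hdisj a.2 (List.mem_map_of_mem ha) (-(J : Int)) (by simp) (by simpa using hcontra)
      constructor
      · exact pvInsert_pairwise _ _ (hsort.sublist (List.dropLast_sublist pool)) hne
      · -- permutation with the pairs of the updated slots
        have hJP : J < (pvPairs slots).length := by rw [pvPairs_length]; exact hJ
        have hPJ : (pvPairs slots)[J] = (M, -(J : Int)) := by
          simp only [pvPairs, List.getElem_map,
            PySem.List.getElem_enumerate slots 0 J (by rw [PySem.List.length_enumerate]; exact hJ)]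
          simp [hMJ]
        have hPsplit : pvPairs slots =
            (pvPairs slots).take J ++ (M, -(J : Int)) :: (pvPairs slots).drop (J + 1) := by
          conv_lhs => rw [← List.take_append_drop J (pvPairs slots)]
          rw [← List.getElem_cons_drop hJP, hPJ]
        have h1p : (pool.dropLast ++ [((M : Int), -(J : Int))]).Perm
            ((pvPairs slots).take J ++ (M, -(J : Int)) :: (pvPairs slots).drop (J + 1)) := by
          rw [hsplit, ← hPsplit]; exact hperm
        have h3p : pool.dropLast.Perm
            ((pvPairs slots).take J ++ (pvPairs slots).drop (J + 1)) :=
          (((List.perm_append_singleton _ _).symm.trans h1p).trans List.perm_middle).cons_inv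
        rw [pvPairs_set]
        have hset : (pvPairs slots).set J (x, -(J : Int)) =
            (pvPairs slots).take J ++ (x, -(J : Int)) :: (pvPairs slots).drop (J + 1) :=
          List.set_eq_take_cons_drop _ hJP
        rw [hset]
        exact (pvInsert_perm _ _).trans ((h3p.cons _).trans List.perm_middle.symm)
  · have hred : pvStepB (slots, pool) x = (slots, pool) := by
      simp [pvStepB, hlast, hx]
    have hredA : pvStepA slots x = slots := by
      simp [pvStepA, hmax, hx]
    rw [hred, hredA]
    exact ⟨rfl, h1, hsort, hperm⟩

lemma pvLoop_ok (arr : List Int) (slots : List Int) (pool : List (Int × Int))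
    (h1 : slots ≠ []) (h2 : pvInv slots pool) :
    (arr.foldl pvStepB (slots, pool)).1 = arr.foldl pvStepA slots := by
  induction arr generalizing slots pool with
  | nil => rfl
  | cons x rest ih =>
    obtain ⟨he, hne, hinv⟩ := pvStep_ok x slots pool h1 h2
    have : pvStepB (slots, pool) x = ((pvStepB (slots, pool) x).1, (pvStepB (slots, pool) x).2) := rfl
    simp only [List.foldl_cons]
    rw [this, ih _ _ hne hinv, he]

-- ===== VERDICT (by name: the statement is the Claim_ definition above) =====
theorem find_most_close_spec : Claim_equal_find_most_close := by
  intro arr k _ hpre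
  unfold Spec_find_most_close
  rcases hpre with ⟨rfl, hk⟩ | ⟨hne, hk⟩
  · simp [find_most_close, find_most_close_alt,
      PySem.List.pyRange_one_eq_nil (by omega : k ≤ (0 : Int)),
      PySem.List.pyRange_neg_one_eq_nil (by omega : k - 1 ≤ (-1 : Int))]
  · have hA : find_most_close arr k =
        arr.foldl pvStepA
          ((PySem.List.pyRange 0 k 1).map (fun _ => (PySem.List.max? arr (fun y => y)).getD 0)) := by
      unfold find_most_close
      rw [PySem.List.foldl_append_singleton_eq_map
        (fun _ => (PySem.List.max? arr (fun y => y)).getD 0) (PySem.List.pyRange 0 k 1) []]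
      rfl
    rw [hA]
    set M := (PySem.List.max? arr (fun y => y)).getD 0 with hM
    set slots0 := (PySem.List.pyRange 0 k 1).map (fun _ => M) with hs0
    set pool0 := (PySem.List.pyRange (k-1) (-1) (-1)).map
      (fun j => (PySem.List.pyGetD slots0 j 0, -j)) with hp0
    have hB : find_most_close_alt arr k = (arr.foldl pvStepB (slots0, pool0)).1 := rfl
    rw [hB]
    have hlen0 : slots0.length = k.toNat := by
      simp [hs0, PySem.List.length_pyRange_one]
    have hne0 : slots0 ≠ [] := by
      intro h
      rw [h] at hlen0
      simp at hlen0
      omega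
    have hrev : PySem.List.pyRange (k-1) (-1) (-1) = (PySem.List.pyRange 0 k 1).reverse := by
      rw [PySem.List.pyRange_neg_one_eq_reverse]
      norm_num
    have hpg : ∀ j ∈ PySem.List.pyRange (k-1) (-1) (-1), PySem.List.pyGetD slots0 j 0 = M := by
      intro j hj
      obtain ⟨hj1, hj2⟩ := PySem.List.mem_pyRange_neg_one.mp hj
      exact PySem.List.pyGetD_map_pyRange_of_nonneg (fun _ => M) k j 0 (by omega) (by omega)
    have hpool0 : pool0 = (PySem.List.pyRange (k-1) (-1) (-1)).map (fun j => ((M : Int), -j)) :=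
      List.map_congr_left (fun j hj => by rw [hpg j hj])
    have hpairs0 : pvPairs slots0 = (PySem.List.pyRange 0 k 1).map (fun j => ((M : Int), -j)) := by
      unfold pvPairs
      rw [PySem.List.enumerate_eq_map_pyRange slots0 0]
      have hlen : PySem.List.len slots0 = k := by
        simp [hlen0]
        omega
      rw [hlen, List.map_map]
      refine List.map_congr_left (fun j hj => ?_)
      obtain ⟨hj1, hj2⟩ := PySem.List.mem_pyRange_one.mp hj
      simp only [Function.comp_apply]
      rw [hs0, PySem.List.pyGetD_map_pyRange_of_nonneg (fun _ => M) k j 0 hj1 hj2]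
    have hinv : pvInv slots0 pool0 := by
      constructor
      · rw [hpool0, hrev, List.map_reverse]
        rw [List.pairwise_reverse, List.pairwise_map]
        refine (PySem.List.pairwise_lt_pyRange_one 0 k).imp ?_
        intro a b hab
        simp only [pvLexLt, Bool.or_eq_true, Bool.and_eq_true, decide_eq_true_eq, beq_iff_eq]
        refine Or.inr ⟨?_, by omega⟩
        trivial
      · rw [hpool0, hrev, List.map_reverse, hpairs0]
        exact List.reverse_perm _
    exact (pvLoop_ok arr slots0 pool0 hne0 hinv).symm
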